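-- pv_equiv track=rewrite | github.com/abdullaabdullazade/rio-semifinal-submissions-2025 | Munis_Gözəlov_Firdovsi oğlu_9.0_3_100BAL_RIO2025_Semifinal_J2.py | solve
-- ===== SOURCE A (Python) =====
-- MOD = 10**9 + 7
--
-- def solve(test_cases):
--     results = []
--
--     for n, a, b in test_cases:
--         # Qutuları və oyuncaqları sıralayırıq
--         a.sort()
--         b.sort()
--
--         # Üsulları saymaq
--         ways = 1
--         j = 0  # b listində növbəti oyuncağı tapmaq üçün indeks
--
--         for i in range(n):
--             # a[i] qutusu üçün uyğun oyuncaqları tapırıq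
--             while j < n and b[j] <= a[i]:
--                 j += 1
--
--             # j sayda uyğun oyuncağı seçə bilərik
--             # Yalnız qalan oyuncaqları seçə bilərik
--             ways *= j - i
--             ways %= MOD
--
--         results.append(ways)
--
--     return results
-- ===== SOURCE B (Python) =====
-- MOD = 10**9 + 7
--
-- def solve(test_cases):
--     results = []
--     for n, a, b in test_cases:
--         a.sort()
--         b.sort()
--         # merge boxes and toys into one tagged event stream and sweep it once:
--         # toys (kind 0) sort before boxes (kind 1) at equal value, so when a box
--         # event arrives every toy that fits it has already been counted.
--         events = [(b[j], 0) for j in range(n)] + [(a[i], 1) for i in range(n)]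
--         events.sort()
--         ways = 1
--         toys = 0
--         used = 0
--         for x, kind in events:
--             if kind:
--                 ways = ways * (toys - used) % MOD
--                 used += 1
--             else:
--                 toys += 1
--         results.append(ways)
--     return results
-- ===== Notes on version B (the rewrite author's own statement) =====
-- stated objective: alternative
-- what changed: A's synchronized two-pointer sweep over two separate sorted lists is replaced by building one combined tagged event list (toy/box pairs), sorting it, and doing a single counter sweep over the merged stream.
-- outside the precondition, e.g. on solve([(2, [0, 5], [9])]): A returns [0], B raises IndexError
import Mathlib
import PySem

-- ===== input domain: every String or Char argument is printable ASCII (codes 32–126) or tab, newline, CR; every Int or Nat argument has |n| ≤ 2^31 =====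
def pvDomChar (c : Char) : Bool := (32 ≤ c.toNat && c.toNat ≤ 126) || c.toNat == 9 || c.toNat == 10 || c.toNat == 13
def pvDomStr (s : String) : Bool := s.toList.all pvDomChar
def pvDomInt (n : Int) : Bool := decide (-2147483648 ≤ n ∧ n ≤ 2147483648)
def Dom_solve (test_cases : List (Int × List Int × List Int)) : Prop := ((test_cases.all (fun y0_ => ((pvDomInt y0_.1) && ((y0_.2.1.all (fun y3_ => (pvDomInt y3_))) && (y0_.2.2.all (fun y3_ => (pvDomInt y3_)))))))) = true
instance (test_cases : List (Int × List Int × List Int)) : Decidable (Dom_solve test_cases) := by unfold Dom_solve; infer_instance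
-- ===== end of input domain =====

-- B replaces A's synchronized two-pointer walk over two separate sorted lists by one
-- combined tagged event list (toy/box pairs) that is sorted and swept once with counters
-- (alternative structure, same cost). Both Pythons sort the input lists a and b IN PLACE
-- (the same mutation); the theorems below are about the return value.

def MOD : Int := 10 ^ 9 + 7

-- ===== PORT A =====
-- A's inner 'while j < n and b[j] <= a[i]: j += 1' loop; fuel = (n - j).toNat at the call site
def solveWhile (bs : List Int) (n x : Int) (j : Int) : Nat → Int
  | 0 => j
  | fuel+1 =>
    if j < n ∧ PySem.List.pyGetD bs j 0 ≤ x then solveWhile bs n x (j+1) fuel else j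

def solveCase (n : Int) (a b : List Int) : Int :=
  let sa := PySem.List.sorted a (fun x => x)
  let sb := PySem.List.sorted b (fun x => x)
  ((PySem.List.pyRange 0 n 1).foldl
    (fun (st : Int × Int) i =>
      let j := solveWhile sb n (PySem.List.pyGetD sa i 0) st.2 (n - st.2).toNat
      (PySem.Int.mod (st.1 * (j - i)) MOD, j))
    (1, 0)).1

def solve (test_cases : List (Int × List Int × List Int)) : List Int :=
  test_cases.foldl (fun res t => res ++ [solveCase t.1 t.2.1 t.2.2]) []

-- ===== PORT B =====
-- B: events = [(b[j],0) for j in range(n)] + [(a[i],1) for i in range(n)]; events.sort();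
-- then one sweep: a toy event bumps the toy counter, a box event multiplies ways by
-- (toys - used) mod MOD and bumps the used counter.
def solveCaseAlt (n : Int) (a b : List Int) : Int :=
  let sa := PySem.List.sorted a (fun x => x)
  let sb := PySem.List.sorted b (fun x => x)
  let events :=
    (PySem.List.pyRange 0 n 1).map (fun j => (PySem.List.pyGetD sb j 0, (0 : Int)))
      ++ (PySem.List.pyRange 0 n 1).map (fun i => (PySem.List.pyGetD sa i 0, (1 : Int)))
  let sevents := PySem.List.sorted2 events (fun e => e.1) (fun e => e.2)
  (sevents.foldl
    (fun (st : Int × Int × Int) e =>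
      if e.2 ≠ 0 then
        (PySem.Int.mod (st.1 * (st.2.1 - st.2.2)) MOD, st.2.1, st.2.2 + 1)
      else
        (st.1, st.2.1 + 1, st.2.2))
    (1, 0, 0)).1

def solve_alt (test_cases : List (Int × List Int × List Int)) : List Int :=
  test_cases.foldl (fun res t => res ++ [solveCaseAlt t.1 t.2.1 t.2.2]) []

-- ===== PRECONDITION & SPEC =====
-- Pre_ excludes malformed test cases whose stated size n exceeds a list length: there A
-- either raises IndexError or returns a value only by the accident of 'and' short-circuit
-- (every toy > every used box), while B's comprehension indexes past the end and raises.
def Pre_solve (test_cases : List (Int × List Int × List Int)) : Prop :=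
  ∀ t ∈ test_cases, t.1 ≤ (t.2.1.length : Int) ∧ t.1 ≤ (t.2.2.length : Int)
instance (test_cases : List (Int × List Int × List Int)) : Decidable (Pre_solve test_cases) := by
  unfold Pre_solve; infer_instance

def pvWitness_solve : (List (Int × List Int × List Int)) := [(2, [2, 1], [1, 2])]

def Spec_solve (test_cases : List (Int × List Int × List Int)) (out : List Int) : Prop := out = solve_alt test_cases
instance (test_cases : List (Int × List Int × List Int)) (out : List Int) : Decidable (Spec_solve test_cases out) := by unfold Spec_solve; infer_instance

-- ===== CLAIM (what is proved, stated in full; the proofs are below) =====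
def Claim_equal_solve : Prop := ∀ (test_cases : List (Int × List Int × List Int)), Dom_solve test_cases → Pre_solve test_cases → Spec_solve test_cases (solve test_cases)

-- ===== LEMMAS AND PROOFS =====

-- number of elements ≤ x among the first m entries of l (the count both programs realise)
def cntLE (l : List Int) (m : Nat) (x : Int) : Nat :=
  (l.take m).countP (fun v => v ≤ x)

-- the common specification both per-case loops are reduced to
def specFold (n : Int) (sa sb : List Int) : Int :=
  (PySem.List.pyRange 0 n 1).foldl
    (fun (w : Int) i =>
      PySem.Int.mod (w * ((cntLE sb n.toNat (PySem.List.pyGetD sa i 0) : Int) - i)) MOD) 1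

-- ---- shared count lemmas ----

-- in a sorted list the elements ≤ x form a prefix of length countP
lemma char_le (x : Int) :
    ∀ (l : List Int), l.Pairwise (· ≤ ·) → ∀ (k : Nat) (hk : k < l.length),
      (l[k] ≤ x ↔ k < l.countP (fun v => v ≤ x)) := by
  intro l hl
  induction l with
  | nil => intro k hk; simp at hk
  | cons y t ih =>
    rcases List.pairwise_cons.mp hl with ⟨hy, ht⟩
    intro k hk
    by_cases hyx : y ≤ x
    · cases k with
      | zero => simp [hyx]
      | succ k =>
        have := ih ht k (by simpa using hk)
        simp only [List.getElem_cons_succ, List.countP_cons, hyx]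
        simpa using this
    · have ht0 : t.countP (fun v => v ≤ x) = 0 := by
        apply List.countP_eq_zero.mpr
        intro z hz
        simp only [decide_eq_true_eq]
        intro hzx
        exact hyx (le_trans (hy z hz) hzx)
      cases k with
      | zero => simp [hyx, ht0]
      | succ k =>
        have hk' : k < t.length := by simpa using hk
        have hyz : y ≤ t[k] := hy _ (List.getElem_mem hk')
        simp [hyx, ht0]
        omega

lemma cntLE_le (l : List Int) (m : Nat) (x : Int) (hm : m ≤ l.length) :
    cntLE l m x ≤ m := by
  have := List.countP_le_length (l := l.take m) (p := fun v => v ≤ x)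
  simpa [cntLE, Nat.min_eq_left hm] using this

lemma char_le_take (bs : List Int) (hs : bs.Pairwise (· ≤ ·)) (m : Nat) (hm : m ≤ bs.length)
    (x : Int) (k : Nat) (hk : k < m) :
    (bs[k]'(by omega) ≤ x ↔ k < cntLE bs m x) := by
  have hsp : (bs.take m).Pairwise (· ≤ ·) := List.Pairwise.take hs
  have hkl : k < (bs.take m).length := by simp [Nat.min_eq_left hm]; omega
  have := char_le x (bs.take m) hsp k hkl
  simpa [cntLE, List.getElem_take] using this

lemma cntLE_mono (l : List Int) (m : Nat) {x y : Int} (hxy : x ≤ y) :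
    cntLE l m x ≤ cntLE l m y := by
  apply List.countP_mono_left
  intro v _ hv
  simp only [decide_eq_true_eq] at *
  omega

-- ---- A-side: the while loop lands exactly on cntLE ----
lemma solveWhile_eq (bs : List Int) (hs : bs.Pairwise (· ≤ ·)) (n x : Int)
    (hn : n ≤ (bs.length : Int)) :
    ∀ (fuel : Nat) (j : Int), 0 ≤ j → j ≤ (cntLE bs n.toNat x : Int) →
      (n - j).toNat ≤ fuel → solveWhile bs n x j fuel = (cntLE bs n.toNat x : Int) := by
  have hcm : cntLE bs n.toNat x ≤ n.toNat := cntLE_le bs n.toNat x (by omega)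
  intro fuel
  induction fuel with
  | zero => intro j h0 hjc hf; simp only [solveWhile]; omega
  | succ fuel ih =>
    intro j h0 hjc hf
    by_cases hjc' : j < (cntLE bs n.toNat x : Int)
    · have hjm : j.toNat < n.toNat := by omega
      have hjlen : j.toNat < bs.length := by omega
      have hle : bs[j.toNat] ≤ x :=
        (char_le_take bs hs n.toNat (by omega) x j.toNat hjm).mpr (by omega)
      have hget : PySem.List.pyGetD bs j 0 = bs[j.toNat] :=
        PySem.List.pyGetD_eq_getElem bs 0 h0 (by omega)
      simp only [solveWhile]
      rw [if_pos ⟨by omega, by rw [hget]; exact hle⟩]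
      exact ih (j+1) (by omega) (by omega) (by omega)
    · have hj : j = (cntLE bs n.toNat x : Int) := by omega
      simp only [solveWhile]
      by_cases hjn : j < n
      · have hjm : j.toNat < n.toNat := by omega
        have hget : PySem.List.pyGetD bs j 0 = bs[j.toNat]'(by omega) :=
          PySem.List.pyGetD_eq_getElem bs 0 h0 (by omega)
        have hnle : ¬ bs[j.toNat]'(by omega) ≤ x := by
          intro h
          have := (char_le_take bs hs n.toNat (by omega) x j.toNat hjm).mp h
          omega
        rw [if_neg (by rw [hget]; exact fun h => hnle h.2)]
        exact hj
      · rw [if_neg (fun h => hjn h.1)]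
        exact hj

-- ---- A's synchronized fold equals specFold, index prefix by index prefix ----
lemma case_foldA (sa sb : List Int) (hsa : sa.Pairwise (· ≤ ·)) (hsb : sb.Pairwise (· ≤ ·))
    (n : Int) (hna : n ≤ (sa.length : Int)) (hnb : n ≤ (sb.length : Int)) :
    ∀ (k : Nat), (k : Int) ≤ n →
      (PySem.List.pyRange 0 (k : Int) 1).foldl
        (fun (st : Int × Int) i =>
          let j := solveWhile sb n (PySem.List.pyGetD sa i 0) st.2 (n - st.2).toNat
          (PySem.Int.mod (st.1 * (j - i)) MOD, j))
        (1, 0)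
      = ((PySem.List.pyRange 0 (k : Int) 1).foldl
          (fun (w : Int) i =>
            PySem.Int.mod (w * ((cntLE sb n.toNat (PySem.List.pyGetD sa i 0) : Int) - i)) MOD) 1,
         if k = 0 then 0 else (cntLE sb n.toNat (PySem.List.pyGetD sa ((k : Int) - 1) 0) : Int)) := by
  intro k
  induction k with
  | zero => intro _; simp [PySem.List.pyRange_one_eq_nil]
  | succ k ih =>
    intro hk1
    have hk : (k : Int) ≤ n := by push_cast at hk1 ⊢; omega
    have hsplit : PySem.List.pyRange 0 ((k : Nat) + 1 : Int) 1
        = PySem.List.pyRange 0 (k : Int) 1 ++ [(k : Int)] :=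
      PySem.List.pyRange_one_succ_right (by positivity)
    have hcast : (((k + 1 : Nat)) : Int) = (k : Int) + 1 := by push_cast; ring
    rw [hcast, hsplit, List.foldl_append, List.foldl_append, ih hk]
    simp only [List.foldl_cons, List.foldl_nil]
    set x : Int := PySem.List.pyGetD sa (k : Int) 0 with hx
    have hkn : (k : Int) < n := by omega
    have hprev_le : (if k = 0 then 0 else (cntLE sb n.toNat (PySem.List.pyGetD sa ((k : Int) - 1) 0) : Int))
        ≤ (cntLE sb n.toNat x : Int) := by
      by_cases h0 : k = 0
      · simp [h0]
      · rw [if_neg h0]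
        have hk1' : ((k : Int) - 1) = ((k - 1 : Nat) : Int) := by omega
        have hprevlt : (k - 1 : Nat) < sa.length := by omega
        have hklt : k < sa.length := by omega
        have hgp : PySem.List.pyGetD sa ((k : Int) - 1) 0 = sa[k - 1] := by
          rw [hk1']; exact PySem.List.pyGetD_eq_getElem sa 0 (by omega) (by exact_mod_cast hprevlt)
        have hgk : x = sa[k] := by
          rw [hx]; exact PySem.List.pyGetD_eq_getElem sa 0 (by omega) (by exact_mod_cast hklt)
        have hle : sa[k - 1] ≤ sa[k] :=
          List.pairwise_iff_getElem.mp hsa (k - 1) k hprevlt hklt (by omega)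
        have hmono : cntLE sb n.toNat (sa[k - 1]'hprevlt) ≤ cntLE sb n.toNat x := by
          rw [hgk]; exact cntLE_mono sb n.toNat hle
        rw [hgp]
        exact_mod_cast hmono
    have hwhile : solveWhile sb n x
        (if k = 0 then 0 else (cntLE sb n.toNat (PySem.List.pyGetD sa ((k : Int) - 1) 0) : Int))
        (n - (if k = 0 then 0 else (cntLE sb n.toNat (PySem.List.pyGetD sa ((k : Int) - 1) 0) : Int))).toNat
        = (cntLE sb n.toNat x : Int) := by
      apply solveWhile_eq sb hsb n x hnb
      · by_cases h0 : k = 0 <;> simp [h0]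
      · exact hprev_le
      · omega
    simp only [hwhile, Prod.mk.injEq]
    refine ⟨trivial, ?_⟩
    · have : ((k : Int) + 1 - 1) = (k : Int) := by ring
      simp [this, hx]

-- ---- B-side: the sorted tagged event sweep ----

-- Python's tuple 'less-than' on (value, kind) pairs, as sorted2 uses it
def evLT (a b : Int × Int) : Bool :=
  decide (a.1 < b.1) || (!decide (b.1 < a.1) && decide (a.2 < b.2))

-- the matching non-strict lexicographic order
def lexLe (a b : Int × Int) : Prop := a.1 < b.1 ∨ (a.1 = b.1 ∧ a.2 ≤ b.2)

lemma sorted2_eq_foldl (xs : List (Int × Int)) :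
    PySem.List.sorted2 xs (fun e => e.1) (fun e => e.2)
      = xs.foldl (fun acc x => PySem.List.insertBy evLT x acc) [] := rfl

lemma lexLe_of_evLT {x y : Int × Int} (h : evLT x y = true) : lexLe x y := by
  simp [evLT] at h; unfold lexLe; omega

lemma lexLe_of_not_evLT {x y : Int × Int} (h : evLT y x = false) : lexLe x y := by
  simp [evLT] at h; unfold lexLe; omega

lemma evLT_lexLe_trans {x y z : Int × Int} (h1 : evLT x y = true) (h2 : lexLe y z) :
    lexLe x z := by
  simp [evLT] at h1; unfold lexLe at *; omega

lemma pairwise_insertBy (x : Int × Int) :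
    ∀ (ys : List (Int × Int)), ys.Pairwise lexLe →
      (PySem.List.insertBy evLT x ys).Pairwise lexLe := by
  intro ys
  induction ys with
  | nil => intro _; simp [PySem.List.insertBy]
  | cons y ys ih =>
    intro h
    rcases List.pairwise_cons.mp h with ⟨hy, ht⟩
    by_cases hb : evLT x y = true
    · rw [PySem.List.insertBy, if_pos hb]
      refine List.pairwise_cons.mpr ⟨?_, h⟩
      intro z hz
      rcases List.mem_cons.mp hz with rfl | hz
      · exact lexLe_of_evLT hb
      · exact evLT_lexLe_trans hb (hy z hz)
    · rw [PySem.List.insertBy, if_neg hb]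
      refine List.pairwise_cons.mpr ⟨?_, ih ht⟩
      intro z hz
      rcases (PySem.List.mem_insertBy evLT x z ys).mp hz with rfl | hz
      · exact lexLe_of_not_evLT (by simpa using hb)
      · exact hy z hz

lemma pairwise_foldl_insertBy :
    ∀ (xs acc : List (Int × Int)), acc.Pairwise lexLe →
      (xs.foldl (fun acc x => PySem.List.insertBy evLT x acc) acc).Pairwise lexLe := by
  intro xs
  induction xs with
  | nil => intro acc h; simpa
  | cons x xs ih =>
    intro acc h
    exact ih _ (pairwise_insertBy x acc h)

-- the product accumulated over the box events, toys held fixed as a list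
def boxFold (bs toys : List (Int × Int)) (w t i : Int) : Int :=
  match bs with
  | [] => w
  | x :: rest =>
    boxFold rest toys
      (PySem.Int.mod (w * ((t + (toys.countP (fun e => e.1 ≤ x.1) : Int)) - i)) MOD) t (i + 1)

lemma boxFold_congr_toys {toys₁ toys₂ : List (Int × Int)} (hp : toys₁.Perm toys₂) :
    ∀ (bs : List (Int × Int)) (w t i : Int),
      boxFold bs toys₁ w t i = boxFold bs toys₂ w t i := by
  intro bs
  induction bs with
  | nil => intro w t i; rfl
  | cons x rest ih =>
    intro w t i
    simp only [boxFold, hp.countP_eq]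
    exact ih _ _ _

lemma boxFold_toy_cons (v : Int × Int) (toys : List (Int × Int)) :
    ∀ (bs : List (Int × Int)), (∀ x ∈ bs, v.1 ≤ x.1) →
      ∀ (w t i : Int), boxFold bs (v :: toys) w t i = boxFold bs toys w (t + 1) i := by
  intro bs
  induction bs with
  | nil => intro _ w t i; rfl
  | cons x rest ih =>
    intro hle w t i
    have hv : v.1 ≤ x.1 := hle x (List.mem_cons_self)
    have hcnt : ((v :: toys).countP (fun e => e.1 ≤ x.1) : Int)
        = (toys.countP (fun e => e.1 ≤ x.1) : Int) + 1 := by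
      simp [hv]
    simp only [boxFold, hcnt]
    rw [ih (fun y hy => hle y (List.mem_cons_of_mem _ hy))]
    ring_nf

lemma boxFold_append (toys : List (Int × Int)) :
    ∀ (bs cs : List (Int × Int)) (w t i : Int),
      boxFold (bs ++ cs) toys w t i = boxFold cs toys (boxFold bs toys w t i) t (i + bs.length) := by
  intro bs
  induction bs with
  | nil => intro cs w t i; simp [boxFold]
  | cons x rest ih =>
    intro cs w t i
    simp only [List.cons_append, boxFold, ih, List.length_cons]
    congr 1
    push_cast
    ring

-- the sweep over any lex-sorted 0/1-tagged event list is boxFold over its box events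
lemma sweep_eq :
    ∀ (E : List (Int × Int)), E.Pairwise lexLe → (∀ e ∈ E, e.2 = 0 ∨ e.2 = 1) →
      ∀ (w t i : Int),
        (E.foldl
          (fun (st : Int × Int × Int) e =>
            if e.2 ≠ 0 then
              (PySem.Int.mod (st.1 * (st.2.1 - st.2.2)) MOD, st.2.1, st.2.2 + 1)
            else
              (st.1, st.2.1 + 1, st.2.2))
          (w, t, i)).1
        = boxFold (E.filter (fun e => !(e.2 == 0))) (E.filter (fun e => e.2 == 0)) w t i := by
  intro E
  induction E with
  | nil => intro _ _ w t i; rfl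
  | cons v rest ih =>
    intro hpw hk w t i
    rcases List.pairwise_cons.mp hpw with ⟨hv, hrest⟩
    have hk' : ∀ e ∈ rest, e.2 = 0 ∨ e.2 = 1 := fun e he => hk e (List.mem_cons_of_mem _ he)
    rcases hk v (List.mem_cons_self) with h0 | h1
    · -- toy event
      simp only [List.foldl_cons]
      rw [if_neg (show ¬ v.2 ≠ 0 by omega)]
      rw [ih hrest hk' w (t + 1) i]
      have hf1 : List.filter (fun e => !(e.2 == 0)) (v :: rest)
          = List.filter (fun e => !(e.2 == 0)) rest := by
        simp [h0]
      have hf2 : List.filter (fun e => e.2 == 0) (v :: rest)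
          = v :: List.filter (fun e => e.2 == 0) rest := by
        simp [h0]
      rw [hf1, hf2, boxFold_toy_cons]
      intro x hx
      rcases List.mem_filter.mp hx with ⟨hxm, _⟩
      have hlx := hv x hxm
      unfold lexLe at hlx
      omega
    · -- box event
      simp only [List.foldl_cons]
      rw [if_pos (show v.2 ≠ 0 by omega)]
      rw [ih hrest hk' _ t (i + 1)]
      have hf1 : List.filter (fun e => !(e.2 == 0)) (v :: rest)
          = v :: List.filter (fun e => !(e.2 == 0)) rest := by
        simp [h1]
      have hf2 : List.filter (fun e => e.2 == 0) (v :: rest)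
          = List.filter (fun e => e.2 == 0) rest := by
        simp [h1]
      rw [hf1, hf2]
      simp only [boxFold]
      have hcnt : ((rest.filter (fun e => e.2 == 0)).countP (fun e => e.1 ≤ v.1)) = 0 := by
        apply List.countP_eq_zero.mpr
        intro z hz
        rcases List.mem_filter.mp hz with ⟨hzm, hz0⟩
        have hz0' : z.2 = 0 := by simpa using hz0
        have hlz := hv z hzm
        unfold lexLe at hlz
        rw [decide_eq_true_iff]
        omega
      rw [hcnt]
      norm_num

-- reading the first n entries of a list through pyGetD over range(n)
lemma map_pyRange_getD (l : List Int) :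
    ∀ (k : Nat), k ≤ l.length →
      (PySem.List.pyRange 0 (k : Int) 1).map (fun j => PySem.List.pyGetD l j 0) = l.take k := by
  intro k
  induction k with
  | zero => intro _; simp [PySem.List.pyRange_one_eq_nil]
  | succ k ih =>
    intro hk
    have hsplit : PySem.List.pyRange 0 ((k : Nat) + 1 : Int) 1
        = PySem.List.pyRange 0 (k : Int) 1 ++ [(k : Int)] :=
      PySem.List.pyRange_one_succ_right (by positivity)
    have hcast : (((k + 1 : Nat)) : Int) = (k : Int) + 1 := by push_cast; ring
    rw [hcast, hsplit, List.map_append, ih (by omega)]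
    have hget : PySem.List.pyGetD l (k : Int) 0 = l[k]'(by omega) :=
      PySem.List.pyGetD_eq_getElem l 0 (by positivity) (by exact_mod_cast (by omega : k < l.length))
    have : l.take (k + 1) = l.take k ++ [l[k]'(by omega)] := by
      rw [List.take_succ]
      congr 1
      rw [List.getElem?_eq_getElem (by omega)]
      rfl
    rw [this]
    simp [hget]

-- antisymmetry: two lex-sorted permutations coincide
lemma eq_of_perm_of_lexSorted {l₁ l₂ : List (Int × Int)} (hp : l₁.Perm l₂)
    (h1 : l₁.Pairwise lexLe) (h2 : l₂.Pairwise lexLe) : l₁ = l₂ := by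
  refine List.Perm.eq_of_pairwise ?_ h1 h2 hp
  intro a b _ _ hab hba
  unfold lexLe at hab hba
  have h : a.1 = b.1 ∧ a.2 = b.2 := by omega
  exact Prod.ext h.1 h.2

-- boxFold over the box events of the sorted prefix realises specFold
lemma boxFold_spec (sa sb : List Int) (n : Int)
    (hna : n ≤ (sa.length : Int)) (hnb : n ≤ (sb.length : Int)) :
    ∀ (k : Nat), k ≤ n.toNat →
      boxFold (((sa.take n.toNat).map (fun v => (v, (1 : Int)))).take k)
          ((sb.take n.toNat).map (fun v => (v, (0 : Int)))) 1 0 0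
      = (PySem.List.pyRange 0 (k : Int) 1).foldl
          (fun (w : Int) i =>
            PySem.Int.mod (w * ((cntLE sb n.toNat (PySem.List.pyGetD sa i 0) : Int) - i)) MOD) 1 := by
  intro k
  induction k with
  | zero => intro _; simp [boxFold, PySem.List.pyRange_one_eq_nil]
  | succ k ih =>
    intro hk
    have hlenB : (((sa.take n.toNat).map (fun v => (v, (1 : Int))))).length = n.toNat := by
      simp [Nat.min_eq_left (by omega : n.toNat ≤ sa.length)]
    have hklt : k < (((sa.take n.toNat).map (fun v => (v, (1 : Int))))).length := by omega
    have hksa : k < sa.length := by omega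
    have htk : (((sa.take n.toNat).map (fun v => (v, (1 : Int))))).take (k + 1)
        = (((sa.take n.toNat).map (fun v => (v, (1 : Int))))).take k
          ++ [(sa[k]'hksa, (1 : Int))] := by
      rw [List.take_succ, List.getElem?_eq_getElem hklt]
      congr 1
      simp [List.getElem_take]
    have hlentk : ((((sa.take n.toNat).map (fun v => (v, (1 : Int))))).take k).length = k := by
      simp; omega
    have hsplit : PySem.List.pyRange 0 ((k : Nat) + 1 : Int) 1
        = PySem.List.pyRange 0 (k : Int) 1 ++ [(k : Int)] :=
      PySem.List.pyRange_one_succ_right (by positivity)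
    have hcast : (((k + 1 : Nat)) : Int) = (k : Int) + 1 := by push_cast; ring
    rw [hcast, hsplit, htk, boxFold_append, List.foldl_append, ih (by omega), hlentk]
    simp only [boxFold, List.foldl_cons, List.foldl_nil]
    have hget : PySem.List.pyGetD sa (k : Int) 0 = sa[k]'hksa :=
      PySem.List.pyGetD_eq_getElem sa 0 (by positivity) (by exact_mod_cast hksa)
    have hcnt : (((sb.take n.toNat).map (fun v => (v, (0 : Int)))).countP
        (fun e => e.1 ≤ sa[k]'hksa) : Int) = (cntLE sb n.toNat (sa[k]'hksa) : Int) := by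
      rw [List.countP_map]
      rfl
    rw [hget, hcnt]
    norm_num

-- per test case equality
lemma solveCase_eq (n : Int) (a b : List Int)
    (ha : n ≤ (a.length : Int)) (hb : n ≤ (b.length : Int)) :
    solveCase n a b = solveCaseAlt n a b := by
  by_cases hn : 0 ≤ n
  · unfold solveCase solveCaseAlt
    set sa := PySem.List.sorted a (fun x => x) with hsa_def
    set sb := PySem.List.sorted b (fun x => x) with hsb_def
    have hsa : sa.Pairwise (· ≤ ·) := by
      have := PySem.List.sorted_pairwise a (fun x => x)
      simpa using this
    have hsb : sb.Pairwise (· ≤ ·) := by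
      have := PySem.List.sorted_pairwise b (fun x => x)
      simpa using this
    have hla : n ≤ (sa.length : Int) := by rw [hsa_def, PySem.List.length_sorted]; exact ha
    have hlb : n ≤ (sb.length : Int) := by rw [hsb_def, PySem.List.length_sorted]; exact hb
    have hne : n = ((n.toNat : Nat) : Int) := by omega
    -- A's fold is specFold
    have hA := case_foldA sa sb hsa hsb n hla hlb n.toNat (by omega)
    rw [← hne] at hA
    simp only [hA]
    -- B's events are the tagged sorted prefixes
    have hT : (PySem.List.pyRange 0 n 1).map (fun j => (PySem.List.pyGetD sb j 0, (0 : Int)))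
        = (sb.take n.toNat).map (fun v => (v, (0 : Int))) := by
      have := map_pyRange_getD sb n.toNat (by omega)
      rw [← hne] at this
      rw [← this, List.map_map]
      simp [Function.comp]
    have hB : (PySem.List.pyRange 0 n 1).map (fun i => (PySem.List.pyGetD sa i 0, (1 : Int)))
        = (sa.take n.toNat).map (fun v => (v, (1 : Int))) := by
      have := map_pyRange_getD sa n.toNat (by omega)
      rw [← hne] at this
      rw [← this, List.map_map]
      simp [Function.comp]
    rw [hT, hB]
    set T := (sb.take n.toNat).map (fun v => (v, (0 : Int))) with hTdef
    set B := (sa.take n.toNat).map (fun v => (v, (1 : Int))) with hBdef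
    set SE := PySem.List.sorted2 (T ++ B) (fun e => e.1) (fun e => e.2) with hSEdef
    have hperm : SE.Perm (T ++ B) := PySem.List.sorted2_perm (T ++ B) _ _ false
    have hpw : SE.Pairwise lexLe := by
      rw [hSEdef, sorted2_eq_foldl]
      exact pairwise_foldl_insertBy _ [] (by simp)
    have hkinds : ∀ e ∈ SE, e.2 = 0 ∨ e.2 = 1 := by
      intro e he
      have : e ∈ T ++ B := hperm.mem_iff.mp he
      rcases List.mem_append.mp this with h | h
      · left; rcases List.mem_map.mp h with ⟨v, _, rfl⟩; rfl
      · right; rcases List.mem_map.mp h with ⟨v, _, rfl⟩; rfl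
    rw [sweep_eq SE hpw hkinds 1 0 0]
    -- the filtered box events of SE are exactly B
    have hfBTB : (T ++ B).filter (fun e => !(e.2 == 0)) = B := by
      rw [List.filter_append]
      have h1 : T.filter (fun e => !(e.2 == 0)) = [] := by
        apply List.filter_eq_nil_iff.mpr
        intro e he
        rcases List.mem_map.mp he with ⟨v, _, rfl⟩
        simp
      have h2 : B.filter (fun e => !(e.2 == 0)) = B := by
        apply List.filter_eq_self.mpr
        intro e he
        rcases List.mem_map.mp he with ⟨v, _, rfl⟩
        rfl
      rw [h1, h2, List.nil_append]
    have hfTTB : (T ++ B).filter (fun e => e.2 == 0) = T := by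
      rw [List.filter_append]
      have h1 : T.filter (fun e => e.2 == 0) = T := by
        apply List.filter_eq_self.mpr
        intro e he
        rcases List.mem_map.mp he with ⟨v, _, rfl⟩
        rfl
      have h2 : B.filter (fun e => e.2 == 0) = [] := by
        apply List.filter_eq_nil_iff.mpr
        intro e he
        rcases List.mem_map.mp he with ⟨v, _, rfl⟩
        simp
      rw [h1, h2, List.append_nil]
    have hBpw : B.Pairwise lexLe := by
      rw [hBdef, List.pairwise_map]
      apply List.Pairwise.imp ?_ (List.Pairwise.take hsa)
      intro x y hxy
      unfold lexLe
      simp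
      omega
    have hfB : SE.filter (fun e => !(e.2 == 0)) = B := by
      apply eq_of_perm_of_lexSorted
      · have := hperm.filter (fun e => !(e.2 == 0))
        rwa [hfBTB] at this
      · exact List.Pairwise.filter _ hpw
      · exact hBpw
    have hfT : (SE.filter (fun e => e.2 == 0)).Perm T := by
      have := hperm.filter (fun e => e.2 == 0)
      rwa [hfTTB] at this
    rw [hfB, boxFold_congr_toys hfT]
    -- and boxFold B T realises specFold
    have hBlen : B.length = n.toNat := by
      rw [hBdef]
      simp [Nat.min_eq_left (by omega : n.toNat ≤ sa.length)]
    have hBfull : B.take n.toNat = B := List.take_of_length_le (by omega)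
    rw [← hBfull]
    have := boxFold_spec sa sb n hla hlb n.toNat le_rfl
    rw [← hne] at this
    exact this.symm
  · have hr : PySem.List.pyRange 0 n 1 = [] := PySem.List.pyRange_one_eq_nil (by omega)
    simp [solveCase, solveCaseAlt, hr, PySem.List.sorted2]

-- ===== VERDICT (by name: the statement is the Claim_ definition above) =====
theorem solve_spec : Claim_equal_solve := by
  intro tcs _ hpre
  unfold Spec_solve solve solve_alt
  rw [PySem.List.foldl_append_singleton_eq_map, PySem.List.foldl_append_singleton_eq_map]
  simp only [List.nil_append]
  apply List.map_congr_left
  intro t ht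
  exact solveCase_eq t.1 t.2.1 t.2.2 (hpre t ht).1 (hpre t ht).2
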